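-- pv_equiv track=rewrite | github.com/pashokman/codewars_tasks | 6kyu/7.py | sum_dig_pow
-- ===== SOURCE A (Python) =====
-- def sum_dig_pow(a, b):
--     # create input list
--     input_list = []
--     for i in range(a, b+1):
--         i_to_list = list(str(i))
--
--         # temp variables
--         sum = 0
--         count_list = []
--         x = 0
--
--         for c in range(1, len(i_to_list) + 1):
--             count_list.append(c)
--
--         for d in i_to_list:
--             sum += (int(d)**count_list[x])
--             x += 1
--
--         # main check
--         if i == sum:
--             input_list.append(i)
--
--     return input_list
-- ===== SOURCE B (Python) =====
-- def sum_dig_pow(a, b):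
--     res = []
--     for i in range(a, b + 1):
--         # digits of i, least-significant first, extracted arithmetically
--         digs = []
--         n = i
--         while n > 0:
--             n, d = divmod(n, 10)
--             digs.append(d)
--         # power sum: exponent counts 1-based position from the most-significant end
--         s, e = 0, len(digs)
--         for d in digs:
--             s += d ** e
--             e -= 1
--         if s == i:
--             res.append(i)
--     return res
-- ===== Notes on version B (the rewrite author's own statement) =====
-- stated objective: alternative
-- what changed: B extracts digits arithmetically with divmod (least-significant first) and accumulates the power sum with a decrementing exponent counter, instead of A's string conversion plus a separately built positional count list indexed by a running counter.
import Mathlib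
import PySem

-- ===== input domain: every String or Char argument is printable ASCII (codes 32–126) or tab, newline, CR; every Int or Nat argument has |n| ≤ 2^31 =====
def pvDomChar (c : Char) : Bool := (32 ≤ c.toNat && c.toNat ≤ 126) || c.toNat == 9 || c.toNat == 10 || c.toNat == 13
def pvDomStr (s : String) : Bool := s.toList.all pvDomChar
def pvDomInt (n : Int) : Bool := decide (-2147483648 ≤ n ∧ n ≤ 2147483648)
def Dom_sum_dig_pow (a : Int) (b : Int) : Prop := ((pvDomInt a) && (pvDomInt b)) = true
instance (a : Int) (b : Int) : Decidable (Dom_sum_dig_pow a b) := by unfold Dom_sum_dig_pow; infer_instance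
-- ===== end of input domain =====

-- B replaces A's str()-based digit extraction and positional count list by arithmetic divmod
-- digits with a decrementing exponent counter (alternative decomposition, same cost).
-- Pre_ excludes ranges containing a negative number, where A raises ValueError (int('-')).


-- ===== PORT A =====
def sum_dig_pow (a : Int) (b : Int) : List Int :=
  (PySem.List.pyRange a (b + 1) 1).foldl (fun input_list i =>
    let i_to_list : List Char := PySem.Int.toChars i
    let count_list : List Int :=
      (PySem.List.pyRange 1 (PySem.List.len i_to_list + 1) 1).foldl
        (fun acc c => acc ++ [c]) []
    -- inner loop: state (sum, x); int(d) raises on '-' → ofChars? none, excluded by Pre_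
    let p : Int × Int := i_to_list.foldl
      (fun st d =>
        (st.1 + ((PySem.Int.ofChars? [d]).getD 0) ^
          (PySem.List.pyGetD count_list st.2 0).toNat, st.2 + 1))
      (0, 0)
    if i == p.1 then input_list ++ [i] else input_list) []

-- ===== PORT B =====
-- while n > 0: n, d = divmod(n, 10); digs.append(d)   (digits least-significant first)
-- structural fuel n.toNat + 1 only makes the loop total; it never changes the value
def pvDigitsBGo : Nat → Int → List Int
  | 0, _ => []
  | f + 1, n =>
    if n ≤ 0 then []
    else PySem.Int.mod n 10 :: pvDigitsBGo f (PySem.Int.floordiv n 10)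

def pvDigitsB (n : Int) : List Int := pvDigitsBGo (n.toNat + 1) n

def sum_dig_pow_alt (a : Int) (b : Int) : List Int :=
  (PySem.List.pyRange a (b + 1) 1).foldl (fun res i =>
    let digs : List Int := pvDigitsB i
    let p : Int × Nat := digs.foldl
      (fun st d => (st.1 + d ^ st.2, st.2 - 1)) (0, digs.length)
    if p.1 == i then res ++ [i] else res) []

-- ===== PRECONDITION & SPEC =====
-- Pre_ excludes exactly the inputs where A raises ValueError: a non-empty range starting below 0,
-- on which int('-') fails for the first negative i.
def Pre_sum_dig_pow (a : Int) (b : Int) : Prop := 0 ≤ a ∨ b < a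
instance (a : Int) (b : Int) : Decidable (Pre_sum_dig_pow a b) := by
  unfold Pre_sum_dig_pow; infer_instance

def pvWitness_sum_dig_pow : Int × Int := (1, 150)

def Spec_sum_dig_pow (a : Int) (b : Int) (out : List Int) : Prop := out = sum_dig_pow_alt a b
instance (a : Int) (b : Int) (out : List Int) : Decidable (Spec_sum_dig_pow a b out) := by
  unfold Spec_sum_dig_pow; infer_instance

-- ===== CLAIM (what is proved, stated in full; the proofs are below) =====
def Claim_equal_sum_dig_pow : Prop := ∀ (a : Int) (b : Int), Dom_sum_dig_pow a b →
  Pre_sum_dig_pow a b → Spec_sum_dig_pow a b (sum_dig_pow a b)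

-- ===== LEMMAS AND PROOFS =====

-- little-endian decimal digits of a natural number (proof-side mirror of pvDigitsB)
def pvBd (m : Nat) : List Nat :=
  if h : m = 0 then [] else m % 10 :: pvBd (m / 10)
decreasing_by omega

-- digits of m with the convention str(0) = "0"
def pvBd' (m : Nat) : List Nat := if m = 0 then [0] else pvBd m

lemma pvBd_lt (m : Nat) : ∀ e ∈ pvBd m, e < 10 := by
  induction m using Nat.strong_induction_on with
  | _ m ih =>
    rw [pvBd]
    split
    · simp
    · intro e he
      rcases List.mem_cons.mp he with h | h
      · omega
      · exact ih (m / 10) (by omega) e h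

lemma pvBd'_lt (m : Nat) : ∀ e ∈ pvBd' m, e < 10 := by
  unfold pvBd'
  split
  · simp
  · exact pvBd_lt m

lemma pvDigitsBGo_natCast (f m : Nat) (hf : m < f) :
    pvDigitsBGo f (m : Int) = (pvBd m).map (Nat.cast : Nat → Int) := by
  induction f generalizing m with
  | zero => omega
  | succ f ih =>
    rw [pvDigitsBGo, pvBd]
    by_cases h : m = 0
    · simp [h]
    · have h1 : ¬ ((m : Int) ≤ 0) := by omega
      rw [if_neg h1, dif_neg h]
      have hmod : PySem.Int.mod (m : Int) 10 = ((m % 10 : Nat) : Int) := by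
        rw [PySem.Int.mod_eq_emod_of_pos (by norm_num)]; omega
      have hdiv : PySem.Int.floordiv (m : Int) 10 = ((m / 10 : Nat) : Int) := by
        rw [PySem.Int.floordiv_eq_ediv_of_pos (by norm_num)]; omega
      rw [hmod, hdiv, ih (m / 10) (by omega)]
      simp

lemma pvDigitsB_natCast (m : Nat) :
    pvDigitsB (m : Int) = (pvBd m).map (Nat.cast : Nat → Int) := by
  rw [pvDigitsB]
  exact pvDigitsBGo_natCast _ m (by omega)

lemma toDigitsCore_eq (fuel m : Nat) (ds : List Char) (h : m < fuel) :
    Nat.toDigitsCore 10 fuel m ds = (pvBd' m).reverse.map Nat.digitChar ++ ds := by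
  induction fuel generalizing m ds with
  | zero => omega
  | succ f ih =>
    rw [Nat.toDigitsCore]
    by_cases h0 : m / 10 = 0
    · simp only [h0, if_pos]
      unfold pvBd'
      by_cases hm : m = 0
      · simp [hm]
      · rw [if_neg hm, pvBd, dif_neg hm, pvBd, dif_pos h0]
        have : m % 10 = m := Nat.mod_eq_of_lt (by omega)
        simp [this]
    · simp only [h0]
      rw [ih (m / 10) _ (by omega)]
      have hm : m ≠ 0 := by omega
      unfold pvBd'
      rw [if_neg hm, if_neg h0]
      conv_rhs => rw [pvBd, dif_neg hm]
      simp

lemma toChars_eq (i : Int) (h : 0 ≤ i) :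
    PySem.Int.toChars i = (pvBd' i.toNat).reverse.map Nat.digitChar := by
  rw [PySem.Int.toChars, if_neg (by omega), Nat.toDigits]
  exact (toDigitsCore_eq _ _ _ (by omega)).trans (by simp)

lemma ofChars_digitChar (e : Nat) (h : e < 10) :
    (PySem.Int.ofChars? [Nat.digitChar e]).getD 0 = (e : Int) := by
  interval_cases e <;> decide

lemma pyGetD_pyRange_one (a : Int) (n k : Nat) (hk : k < n) :
    PySem.List.pyGetD (PySem.List.pyRange a (a + n) 1) (k : Int) 0 = a + k := by
  induction n generalizing a k with
  | zero => omega
  | succ m ih =>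
    rw [PySem.List.pyRange_one_cons (by omega)]
    cases k with
    | zero => simp
    | succ j =>
      have := ih (a + 1) j (by omega)
      rw [PySem.List.pyGetD_natCast] at *
      simpa [List.getD_cons_succ, add_comm, add_assoc, add_left_comm] using this

-- big-endian weighted power sum with exponents x+1, x+2, …
def pvAnat : List Nat → Nat → Int
  | [], _ => 0
  | e :: t, x => (e : Int) ^ (x + 1) + pvAnat t (x + 1)

lemma pvAnat_append (es : List Nat) (e : Nat) (x : Nat) :
    pvAnat (es ++ [e]) x = pvAnat es x + (e : Int) ^ (x + es.length + 1) := by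
  induction es generalizing x with
  | nil => simp [pvAnat]
  | cons d t ih =>
    simp only [List.cons_append, pvAnat, ih (x + 1), List.length_cons]
    have : x + 1 + t.length + 1 = x + (t.length + 1) + 1 := by omega
    rw [this]
    exact (add_assoc _ _ _).symm

-- B's inner loop computes the little-endian weighted power sum
def pvBrec : List Int → Int
  | [] => 0
  | d :: t => d ^ (t.length + 1) + pvBrec t

lemma bfold_eq (ds : List Int) (s0 : Int) :
    (ds.foldl (fun (st : Int × Nat) d => (st.1 + d ^ st.2, st.2 - 1)) (s0, ds.length)).1
      = s0 + pvBrec ds := by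
  induction ds generalizing s0 with
  | nil => simp [pvBrec]
  | cons d t ih =>
    simp only [List.foldl_cons, List.length_cons, Nat.add_sub_cancel, pvBrec]
    rw [ih]
    ring

lemma anat_rev_eq_brec (ds : List Nat) :
    pvAnat ds.reverse 0 = pvBrec (ds.map (Nat.cast : Nat → Int)) := by
  induction ds with
  | nil => simp [pvAnat, pvBrec]
  | cons d t ih =>
    simp only [List.reverse_cons, List.map_cons, pvBrec, pvAnat_append, ih,
      List.length_reverse, List.length_map]
    ring

lemma afold_eq (es : List Nat) (h10 : ∀ e ∈ es, e < 10) (K : Nat) (s0 : Int) (x0 : Nat)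
    (hK : x0 + es.length ≤ K) :
    ((es.map Nat.digitChar).foldl
      (fun (st : Int × Int) d =>
        (st.1 + ((PySem.Int.ofChars? [d]).getD 0) ^
          (PySem.List.pyGetD (PySem.List.pyRange 1 ((K : Int) + 1) 1) st.2 0).toNat,
         st.2 + 1))
      (s0, (x0 : Int))).1 = s0 + pvAnat es x0 := by
  induction es generalizing s0 x0 with
  | nil => simp [pvAnat]
  | cons e t ih =>
    simp only [List.map_cons, List.foldl_cons, pvAnat]
    have hget : PySem.List.pyGetD (PySem.List.pyRange 1 ((K : Int) + 1) 1) (x0 : Int) 0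
        = 1 + (x0 : Int) := by
      have := pyGetD_pyRange_one 1 K x0 (by simp at hK; omega)
      rw [show (1 : Int) + (K : Nat) = ((K : Int) + 1) by ring] at this
      exact this
    rw [hget, ofChars_digitChar e (h10 e (List.mem_cons_self))]
    have hx : ((x0 : Int) + 1) = ((x0 + 1 : Nat) : Int) := by push_cast; ring
    have htn : ((1 : Int) + (x0 : Int)).toNat = x0 + 1 := by omega
    rw [htn, hx, ih (fun e he => h10 e (List.mem_cons_of_mem _ he)) _ _
      (by simp at hK ⊢; omega)]
    ring

-- per-element equality of the two loop bodies, for 0 ≤ i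
lemma body_eq (i : Int) (hi : 0 ≤ i) (accA accB : List Int) (hacc : accA = accB) :
    (let i_to_list : List Char := PySem.Int.toChars i
     let count_list : List Int :=
       (PySem.List.pyRange 1 (PySem.List.len i_to_list + 1) 1).foldl
         (fun acc c => acc ++ [c]) []
     let p : Int × Int := i_to_list.foldl
       (fun st d =>
         (st.1 + ((PySem.Int.ofChars? [d]).getD 0) ^
           (PySem.List.pyGetD count_list st.2 0).toNat, st.2 + 1))
       (0, 0)
     if i == p.1 then accA ++ [i] else accA)
    = (let digs : List Int := pvDigitsB i
       let p : Int × Nat := digs.foldl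
         (fun st d => (st.1 + d ^ st.2, st.2 - 1)) (0, digs.length)
       if p.1 == i then accB ++ [i] else accB) := by
  subst hacc
  set m := i.toNat with hm
  have him : i = (m : Int) := by omega
  -- A's inner sum
  have hchars : PySem.Int.toChars i = (pvBd' m).reverse.map Nat.digitChar := toChars_eq i hi
  have hcount : (PySem.List.pyRange 1 (PySem.List.len (PySem.Int.toChars i) + 1) 1).foldl
      (fun acc c => acc ++ [c]) ([] : List Int)
      = PySem.List.pyRange 1 (((pvBd' m).reverse.length : Int) + 1) 1 := by
    rw [PySem.List.foldl_append_singleton_eq_self, List.nil_append, hchars,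
      PySem.List.len_eq]
    simp
  have hA : ∀ (es : List Char), es = PySem.Int.toChars i →
      (es.foldl (fun (st : Int × Int) d =>
        (st.1 + ((PySem.Int.ofChars? [d]).getD 0) ^
          (PySem.List.pyGetD (PySem.List.pyRange 1
            (((pvBd' m).reverse.length : Int) + 1) 1) st.2 0).toNat, st.2 + 1))
        (0, 0)).1 = pvAnat (pvBd' m).reverse 0 := by
    intro es hes
    rw [hes, hchars]
    have := afold_eq (pvBd' m).reverse
      (fun e he => pvBd'_lt m e (List.mem_reverse.mp he))
      (pvBd' m).reverse.length 0 0 (by omega)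
    simpa using this
  -- B's inner sum
  have hdigs : pvDigitsB i = (pvBd m).map (Nat.cast : Nat → Int) := by
    rw [him]; exact pvDigitsB_natCast m
  have hB : ((pvDigitsB i).foldl
      (fun (st : Int × Nat) d => (st.1 + d ^ st.2, st.2 - 1))
      (0, (pvDigitsB i).length)).1 = pvBrec ((pvBd m).map (Nat.cast : Nat → Int)) := by
    rw [hdigs, bfold_eq, zero_add]
  have hsum : pvAnat (pvBd' m).reverse 0 = pvBrec ((pvBd m).map (Nat.cast : Nat → Int)) := by
    by_cases h0 : m = 0
    · rw [h0, show pvBd' 0 = [0] from rfl, show pvBd 0 = [] by simp [pvBd]]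
      simp [pvAnat, pvBrec]
    · rw [show pvBd' m = pvBd m by unfold pvBd'; rw [if_neg h0]]
      exact anat_rev_eq_brec (pvBd m)
  simp only []
  rw [hcount]
  rw [hA _ rfl, hB, hsum]
  have : ∀ s : Int, (i == s) = (s == i) := by
    intro s
    by_cases h : i = s <;> simp [h, Ne.symm]
  rw [this]

-- ===== VERDICT (by name: the statement is the Claim_ definition above) =====
theorem sum_dig_pow_spec : Claim_equal_sum_dig_pow := by
  intro a b _ hpre
  unfold Spec_sum_dig_pow sum_dig_pow sum_dig_pow_alt
  apply PySem.List.foldl_congr_mem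
  intro acc i hi
  have hmem := (PySem.List.mem_pyRange_one).mp hi
  have h0 : 0 ≤ i := by
    rcases hpre with h | h
    · omega
    · omega
  exact body_eq i h0 acc acc rfl
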